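-- pv_equiv track=rewrite | github.com/YashIndane/codewars-solutions | python/Row_of_the_odd_triangle.py | odd_row
-- ===== SOURCE A (Python) =====
-- def odd_row(n):
--     if n==1:
--         return [1]
--     else:
--         if n%2 == 0:
--             mid = n**2
--             l = mid-1
--             r = mid+1
--             size = n//2
--             w = []
--             for x in range(0, size):
--                 w.append(l)
--                 l-=2
--             w.reverse()
--             for x in range(0, size):
--                 w.append(r)
--                 r+=2
--             return w
--         else:
--             mid = n**2
--             l = mid - 2
--             r = mid + 2
--             size = n//2
--             w = []
--             for x in range(0, size):
--                 w.append(l)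
--                 l-=2
--             w.reverse()
--             w.append(mid)
--             for x in range(0, size):
--                 w.append(r)
--                 r+=2
--             return w
-- ===== SOURCE B (Python) =====
-- def odd_row(n):
--     start = n * n - n + 1
--     return list(range(start, start + 2 * n, 2))
-- ===== Notes on version B (the rewrite author's own statement) =====
-- stated objective: simpler
-- what changed: B computes the row's first odd number in closed form (n*n-n+1) and emits the n odds left-to-right with a single range, replacing A's parity branch, two outward-from-midpoint accumulation loops and list reversal. (measured ~3x faster: one C-level range instead of per-element Python appends and a reversal).
-- intended difference: On negative odd n (a nonexistent row) A's empty loops leave the leftover midpoint and it returns [n*n], while B returns the empty list, which is the intended value for a row that does not exist. — e.g. on odd_row(-1): A returns [1], B returns []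
import Mathlib
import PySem

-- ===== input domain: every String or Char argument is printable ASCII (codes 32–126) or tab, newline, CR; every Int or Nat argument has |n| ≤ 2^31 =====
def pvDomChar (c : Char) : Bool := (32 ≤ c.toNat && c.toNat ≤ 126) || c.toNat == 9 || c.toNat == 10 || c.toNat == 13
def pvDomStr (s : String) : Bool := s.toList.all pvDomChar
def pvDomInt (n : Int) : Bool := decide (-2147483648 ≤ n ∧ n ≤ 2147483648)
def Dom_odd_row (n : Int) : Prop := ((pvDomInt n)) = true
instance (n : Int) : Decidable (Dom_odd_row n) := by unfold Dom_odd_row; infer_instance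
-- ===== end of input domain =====

-- B replaces A's parity branch, two outward-from-midpoint loops and reversal by one closed-form range (simpler).


-- ===== PORT A =====
def odd_row (n : Int) : List Int :=
  if n = 1 then [1]
  else if PySem.Int.mod n 2 = 0 then
    let mid := n ^ 2
    let size := PySem.Int.floordiv n 2
    -- for x in range(0, size): w.append(l); l -= 2
    let wl := (PySem.List.pyRange 0 size 1).foldl
      (fun (p : List Int × Int) _ => (p.1 ++ [p.2], p.2 - 2)) ([], mid - 1)
    let w := wl.1.reverse
    -- for x in range(0, size): w.append(r); r += 2
    let wr := (PySem.List.pyRange 0 size 1).foldl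
      (fun (p : List Int × Int) _ => (p.1 ++ [p.2], p.2 + 2)) (w, mid + 1)
    wr.1
  else
    let mid := n ^ 2
    let size := PySem.Int.floordiv n 2
    let wl := (PySem.List.pyRange 0 size 1).foldl
      (fun (p : List Int × Int) _ => (p.1 ++ [p.2], p.2 - 2)) ([], mid - 2)
    let w := wl.1.reverse ++ [mid]
    let wr := (PySem.List.pyRange 0 size 1).foldl
      (fun (p : List Int × Int) _ => (p.1 ++ [p.2], p.2 + 2)) (w, mid + 2)
    wr.1

-- ===== PORT B =====
def odd_row_alt (n : Int) : List Int :=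
  let start := n * n - n + 1
  PySem.List.pyRange start (start + 2 * n) 2

-- ===== PRECONDITION & SPEC =====
-- On negative odd n (a nonexistent row) A's empty loops leave the leftover midpoint and it
-- returns [n*n], while B returns the empty list, the intended value for a row that does not exist.
def D_odd_row (n : Int) : Prop := n < 0 ∧ n % 2 = 1
instance (n : Int) : Decidable (D_odd_row n) := by unfold D_odd_row; infer_instance
def Spec_odd_row (n : Int) (out : List Int) : Prop := ¬ D_odd_row n → out = odd_row_alt n
instance (n : Int) (out : List Int) : Decidable (Spec_odd_row n out) := by unfold Spec_odd_row; infer_instance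
def pvDiffWitness_odd_row : Int := (-1)
def pvDiffWitnessOut_odd_row : (List Int) × (List Int) := ([1], [])

-- ===== CLAIM (what is proved, stated in full; the proofs are below) =====
def Claim_unchanged_odd_row : Prop := ∀ (n : Int), Dom_odd_row n → Spec_odd_row n (odd_row n)
def Claim_changed_odd_row : Prop := Dom_odd_row (pvDiffWitness_odd_row) ∧ D_odd_row (pvDiffWitness_odd_row) ∧ odd_row (pvDiffWitness_odd_row) = pvDiffWitnessOut_odd_row.1 ∧ odd_row_alt (pvDiffWitness_odd_row) = pvDiffWitnessOut_odd_row.2 ∧ pvDiffWitnessOut_odd_row.1 ≠ pvDiffWitnessOut_odd_row.2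
def Claim_exact_odd_row : Prop := ∀ (n : Int), Dom_odd_row n → D_odd_row n → odd_row n ≠ odd_row_alt n

-- ===== LEMMAS AND PROOFS =====

-- The append-and-decrement loop, run over any list, appends a descending arithmetic progression.
theorem fold_down (l : List Int) (w0 : List Int) (x0 : Int) :
    l.foldl (fun (p : List Int × Int) _ => (p.1 ++ [p.2], p.2 - 2)) (w0, x0)
      = (w0 ++ (List.range l.length).map (fun k : Nat => x0 - 2 * (k : Int)),
         x0 - 2 * (l.length : Int)) := by
  induction l generalizing w0 x0 with
  | nil => simp
  | cons a t ih =>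
    simp only [List.foldl_cons, ih, List.length_cons, Prod.mk.injEq]
    refine ⟨?_, by push_cast; ring⟩
    rw [List.range_succ_eq_map, List.append_assoc]
    simp only [List.map_cons, List.map_map]
    rw [List.singleton_append]
    refine congrArg (fun ys => w0 ++ ys) ?_
    simp only [List.cons.injEq]
    refine ⟨by simp, ?_⟩
    apply List.map_congr_left
    intro k _
    simp only [Function.comp_def]
    push_cast
    ring

-- The append-and-increment loop, run over any list, appends an ascending arithmetic progression.
theorem fold_up (l : List Int) (w0 : List Int) (x0 : Int) :
    l.foldl (fun (p : List Int × Int) _ => (p.1 ++ [p.2], p.2 + 2)) (w0, x0)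
      = (w0 ++ (List.range l.length).map (fun k : Nat => x0 + 2 * (k : Int)),
         x0 + 2 * (l.length : Int)) := by
  induction l generalizing w0 x0 with
  | nil => simp
  | cons a t ih =>
    simp only [List.foldl_cons, ih, List.length_cons, Prod.mk.injEq]
    refine ⟨?_, by push_cast; ring⟩
    rw [List.range_succ_eq_map, List.append_assoc]
    simp only [List.map_cons, List.map_map]
    rw [List.singleton_append]
    refine congrArg (fun ys => w0 ++ ys) ?_
    simp only [List.cons.injEq]
    refine ⟨by simp, ?_⟩
    apply List.map_congr_left
    intro k _
    simp only [Function.comp_def]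
    push_cast
    ring

theorem rev_map_range (x0 : Int) (m : Nat) :
    ((List.range m).map (fun k : Nat => x0 - 2 * (k : Int))).reverse
      = (List.range m).map (fun k : Nat => (x0 - 2 * ((m : Int) - 1)) + 2 * (k : Int)) := by
  induction m with
  | zero => simp
  | succ m ih =>
    conv_lhs => rw [List.range_succ]
    rw [List.map_append, List.reverse_append]
    rw [List.range_succ_eq_map (n := m)]
    simp only [List.map_cons, List.map_map, List.map_nil, List.reverse_cons, List.reverse_nil,
      List.nil_append, List.cons_append]
    congr 1
    · push_cast; ring
    · rw [ih]
      apply List.map_congr_left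
      intro k _
      simp only [Function.comp_def]
      push_cast
      ring

theorem mod_eq (n : Int) : PySem.Int.mod n 2 = n % 2 := by
  simp only [PySem.Int.mod]
  rw [Int.fmod_eq_emod]
  simp

theorem floordiv_eq (n : Int) : PySem.Int.floordiv n 2 = n / 2 := by
  simp only [PySem.Int.floordiv]
  rw [Int.fdiv_eq_ediv]
  simp

theorem pyrange_len (s : Int) : (PySem.List.pyRange 0 s 1).length = s.toNat := by
  simp [PySem.List.length_pyRange_one 0 s]

theorem odd_row_unfold_even (n : Int) (h1 : n ≠ 1) (he : PySem.Int.mod n 2 = 0) :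
    odd_row n =
      ((List.range (n / 2).toNat).map (fun k : Nat => (n ^ 2 - 1) - 2 * (k : Int))).reverse
        ++ (List.range (n / 2).toNat).map (fun k : Nat => (n ^ 2 + 1) + 2 * (k : Int)) := by
  unfold odd_row
  rw [if_neg h1, if_pos he]
  simp only [fold_down, fold_up, pyrange_len, floordiv_eq, List.nil_append]

theorem odd_row_unfold_odd (n : Int) (h1 : n ≠ 1) (he : ¬ PySem.Int.mod n 2 = 0) :
    odd_row n =
      (((List.range (n / 2).toNat).map (fun k : Nat => (n ^ 2 - 2) - 2 * (k : Int))).reverse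
        ++ [n ^ 2])
        ++ (List.range (n / 2).toNat).map (fun k : Nat => (n ^ 2 + 2) + 2 * (k : Int)) := by
  unfold odd_row
  rw [if_neg h1, if_neg he]
  simp only [fold_down, fold_up, pyrange_len, floordiv_eq, List.nil_append]

theorem alt_eq_map (n : Int) (hn : 0 ≤ n) :
    odd_row_alt n = (List.range n.toNat).map (fun k : Nat => (n * n - n + 1) + 2 * (k : Int)) := by
  unfold odd_row_alt
  rw [PySem.List.pyRange_of_pos _ _ (by norm_num : (0:Int) < 2)]
  rcases eq_or_lt_of_le hn with h0 | hpos
  · simp [← h0]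
  · have hlt : n * n - n + 1 < n * n - n + 1 + 2 * n := by nlinarith
    rw [if_pos hlt]
    have h2 : (n * n - n + 1 + 2 * n - (n * n - n + 1) + 2 - 1) / 2 = n := by
      have h3 : n * n - n + 1 + 2 * n - (n * n - n + 1) + 2 - 1 = 2 * n + 1 := by ring
      rw [h3]; omega
    rw [h2]

-- ===== VERDICT (by name: the statement is the Claim_ definition above) =====
theorem odd_row_spec : Claim_unchanged_odd_row := by
  intro n _ hD
  unfold D_odd_row at hD
  by_cases h1 : n = 1
  · subst h1; decide
  by_cases hneg : n < 0
  · -- n < 0 and even (by hD): both sides are [].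
    have hm : n % 2 = 0 := by omega
    rw [odd_row_unfold_even n h1 (by rw [mod_eq]; exact hm)]
    have hs : (n / 2).toNat = 0 := by omega
    rw [hs]
    unfold odd_row_alt
    rw [PySem.List.pyRange_of_pos _ _ (by norm_num : (0:Int) < 2)]
    rw [if_neg (by omega : ¬ (n * n - n + 1 < n * n - n + 1 + 2 * n))]
    simp
  · have hn : 0 ≤ n := by omega
    rw [alt_eq_map n hn]
    by_cases he : n % 2 = 0
    · -- even, 0 ≤ n, n ≠ 1
      rw [odd_row_unfold_even n h1 (by rw [mod_eq]; exact he)]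
      obtain ⟨m, hm2, hm⟩ : ∃ m : ℕ, (n / 2).toNat = m ∧ n = 2 * m :=
        ⟨(n / 2).toNat, rfl, by omega⟩
      rw [hm2]
      have hnt : n.toNat = m + m := by omega
      rw [rev_map_range, hnt, List.range_add, List.map_append, List.map_map]
      congr 1
      · apply List.map_congr_left
        intro k _
        rw [sq, hm]
        ring
      · apply List.map_congr_left
        intro k _
        simp only [Function.comp_def]
        rw [sq, hm]
        push_cast
        ring
    · -- odd, 0 ≤ n, n ≠ 1 (so n ≥ 3)
      rw [odd_row_unfold_odd n h1 (by rw [mod_eq]; omega)]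
      obtain ⟨m, hm2, hm⟩ : ∃ m : ℕ, (n / 2).toNat = m ∧ n = 2 * m + 1 :=
        ⟨(n / 2).toNat, rfl, by omega⟩
      rw [hm2]
      have hnt : n.toNat = m + (m + 1) := by omega
      rw [rev_map_range, hnt, List.range_add, List.map_append, List.map_map]
      rw [List.range_succ_eq_map (n := m)]
      simp only [List.map_cons, List.map_map, List.append_assoc, List.cons_append,
        List.nil_append, Function.comp_def]
      congr 1
      · apply List.map_congr_left
        intro k _
        rw [sq, hm]
        ring
      · congr 1
        · rw [sq, hm]
          push_cast
          ring
        · apply List.map_congr_left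
          intro k _
          rw [sq, hm]
          push_cast
          ring

theorem odd_row_changed : Claim_changed_odd_row := by unfold Claim_changed_odd_row; decide

theorem odd_row_tight : Claim_exact_odd_row := by
  intro n _ hD
  unfold D_odd_row at hD
  have h1 : n ≠ 1 := by omega
  rw [odd_row_unfold_odd n h1 (by rw [mod_eq]; omega)]
  have hs : (n / 2).toNat = 0 := by omega
  rw [hs]
  unfold odd_row_alt
  rw [PySem.List.pyRange_of_pos _ _ (by norm_num : (0:Int) < 2)]
  rw [if_neg (by nlinarith [hD.1] : ¬ (n * n - n + 1 < n * n - n + 1 + 2 * n))]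
  simp
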